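-- pv_equiv track=rewrite | github.com/james5635/GeekForGeek-Data-Structure-and-Algorithm | array/rearrange_array_arri/rearrange_array_arri.py | rearrange_naive
-- ===== SOURCE A (Python) =====
-- def rearrange_naive(arr):
--     """
--     Naive approach: For each index i, search for i in array.
--
--     Time Complexity: O(n²)
--     Space Complexity: O(1) - modifies array in-place
--
--     Algorithm:
--     - For each position i from 0 to n-1:
--       - Search if i exists in array
--       - If found, put i at position i
--       - If not found, put -1 at position i
--
--     Args:
--         arr: List of integers with some elements missing (-1 for missing)
--
--     Returns:
--         Modified array with arr[i] = i or -1
--     """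
--     n = len(arr)
--     result = [-1] * n
--
--     for i in range(n):
--         # Search for i in array
--         for j in range(n):
--             if arr[j] == i:
--                 result[i] = i
--                 break
--
--     return result
-- ===== SOURCE B (Python) =====
-- def rearrange_naive(arr):
--     """Single-pass scatter: place each present value 0..n-1 directly into its slot."""
--     n = len(arr)
--     result = [-1] * n
--     for v in arr:
--         if 0 <= v < n:
--             result[v] = v
--     return result
-- ===== Notes on version B (the rewrite author's own statement) =====
-- stated objective: faster
-- what changed: Replaced A's gather (for each index i, inner linear search for i in arr) with a single scatter pass over the values: result[v] = v for every in-range value v.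
import Mathlib
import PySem

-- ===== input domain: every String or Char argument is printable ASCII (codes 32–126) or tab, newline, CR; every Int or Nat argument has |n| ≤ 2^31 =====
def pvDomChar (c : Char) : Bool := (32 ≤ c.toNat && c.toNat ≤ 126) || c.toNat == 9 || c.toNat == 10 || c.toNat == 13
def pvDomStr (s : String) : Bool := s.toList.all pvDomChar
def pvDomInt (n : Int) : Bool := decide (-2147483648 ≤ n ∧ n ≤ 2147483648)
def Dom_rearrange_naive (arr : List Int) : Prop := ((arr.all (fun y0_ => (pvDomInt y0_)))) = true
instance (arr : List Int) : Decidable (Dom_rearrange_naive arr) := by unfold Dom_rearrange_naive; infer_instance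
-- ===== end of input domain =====

-- B replaces A's O(n²) gather (for each index i, linear search for i) with a single O(n)
-- scatter pass over the values; equivalence is about the return value (A does not mutate arr).

-- ===== PORT A =====
-- inner loop: for j in range(n): if arr[j] == i: result[i] = i; break
def pvSearchSet (arr : List Int) (i : Nat) (res : List Int) : List Int :=
  match arr with
  | [] => res
  | x :: rest => if x = (i : Int) then res.set i (i : Int) else pvSearchSet rest i res

def rearrange_naive (arr : List Int) : List Int :=
  let n := arr.length
  (List.range n).foldl (fun res i => pvSearchSet arr i res) (List.replicate n (-1 : Int))

-- ===== PORT B =====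
def rearrange_naive_alt (arr : List Int) : List Int :=
  let n := arr.length
  arr.foldl (fun res v => if 0 ≤ v ∧ v < (n : Int) then res.set v.toNat v else res)
    (List.replicate n (-1 : Int))

-- ===== PRECONDITION & SPEC =====
def Spec_rearrange_naive (arr : List Int) (out : List Int) : Prop := out = rearrange_naive_alt arr
instance (arr : List Int) (out : List Int) : Decidable (Spec_rearrange_naive arr out) := by unfold Spec_rearrange_naive; infer_instance

-- ===== CLAIM (what is proved, stated in full; the proofs are below) =====
def Claim_equal_rearrange_naive : Prop := ∀ (arr : List Int), Dom_rearrange_naive arr → Spec_rearrange_naive arr (rearrange_naive arr)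

-- ===== LEMMAS AND PROOFS =====

theorem pvSearchSet_eq (arr : List Int) (i : Nat) (res : List Int) :
    pvSearchSet arr i res = if (i : Int) ∈ arr then res.set i (i : Int) else res := by
  induction arr with
  | nil => simp [pvSearchSet]
  | cons x rest ih =>
    by_cases h : x = (i : Int)
    · simp [pvSearchSet, h]
    · rw [pvSearchSet, if_neg h, ih]
      by_cases hm : (i : Int) ∈ rest
      · rw [if_pos hm, if_pos (List.mem_cons.mpr (Or.inr hm))]
      · rw [if_neg hm, if_neg (by
          intro hc
          rcases List.mem_cons.mp hc with hc | hc
          · exact h hc.symm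
          · exact hm hc)]

theorem foldlA_getElem? (arr : List Int) (L : List Nat) (r0 : List Int) (k : Nat) :
    ((L.foldl (fun res i => pvSearchSet arr i res) r0))[k]? =
      if k ∈ L ∧ (k : Int) ∈ arr ∧ k < r0.length then some (k : Int) else r0[k]? := by
  induction L generalizing r0 with
  | nil => simp
  | cons i rest ih =>
    rw [List.foldl_cons, pvSearchSet_eq]
    by_cases hm : (i : Int) ∈ arr
    · rw [if_pos hm, ih, List.length_set]
      by_cases hr : k ∈ rest ∧ (k : Int) ∈ arr ∧ k < r0.length
      · rw [if_pos hr, if_pos ⟨List.mem_cons.mpr (Or.inr hr.1), hr.2.1, hr.2.2⟩]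
      · rw [if_neg hr]
        by_cases hki : k = i
        · subst hki
          by_cases hkl : k < r0.length
          · rw [List.getElem?_set_self hkl,
              if_pos ⟨List.mem_cons_self, hm, hkl⟩]
          · rw [List.getElem?_eq_none (by simp only [List.length_set]; omega),
              List.getElem?_eq_none (by omega),
              if_neg (by rintro ⟨_, _, h3⟩; exact hkl h3)]
        · rw [List.getElem?_set_ne (fun h => hki h.symm)]
          rw [if_neg (by
            rintro ⟨h1, h2, h3⟩
            rcases List.mem_cons.mp h1 with h1 | h1
            · exact hki h1
            · exact hr ⟨h1, h2, h3⟩)]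
    · rw [if_neg hm, ih]
      by_cases hr : k ∈ rest ∧ (k : Int) ∈ arr ∧ k < r0.length
      · rw [if_pos hr, if_pos ⟨List.mem_cons.mpr (Or.inr hr.1), hr.2.1, hr.2.2⟩]
      · rw [if_neg hr, if_neg (by
          rintro ⟨h1, h2, h3⟩
          rcases List.mem_cons.mp h1 with h1 | h1
          · subst h1; exact hm h2
          · exact hr ⟨h1, h2, h3⟩)]

theorem foldlB_getElem? (n : Nat) (l r0 : List Int) (k : Nat) :
    ((l.foldl (fun res v => if 0 ≤ v ∧ v < (n : Int) then res.set v.toNat v else res) r0))[k]? =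
      if (k : Int) ∈ l ∧ k < n ∧ k < r0.length then some (k : Int) else r0[k]? := by
  induction l generalizing r0 with
  | nil => simp
  | cons v rest ih =>
    rw [List.foldl_cons, ih]
    have hlen : (if 0 ≤ v ∧ v < (n : Int) then r0.set v.toNat v else r0).length = r0.length := by
      split <;> simp
    rw [hlen]
    by_cases hr : (k : Int) ∈ rest ∧ k < n ∧ k < r0.length
    · rw [if_pos hr, if_pos ⟨List.mem_cons.mpr (Or.inr hr.1), hr.2.1, hr.2.2⟩]
    · rw [if_neg hr]
      by_cases hvk : v = (k : Int)
      · by_cases hkn : k < n ∧ k < r0.length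
        · have h0 : (0 : Int) ≤ v := by omega
          have h1 : v < (n : Int) := by omega
          have ht : v.toNat = k := by omega
          rw [if_pos ⟨h0, h1⟩, ht, List.getElem?_set_self hkn.2, hvk,
            if_pos ⟨List.mem_cons.mpr (Or.inl rfl), hkn.1, hkn.2⟩]
        · have hrhs : ¬((k : Int) ∈ v :: rest ∧ k < n ∧ k < r0.length) := by
            rintro ⟨h1, h2, h3⟩
            rcases List.mem_cons.mp h1 with h1 | h1
            · exact hkn ⟨h2, h3⟩
            · exact hr ⟨h1, h2, h3⟩
          by_cases hc : 0 ≤ v ∧ v < (n : Int)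
          · have hkl : ¬ k < r0.length := by
              intro h; exact hkn ⟨by omega, h⟩
            have ht : v.toNat = k := by omega
            rw [if_pos hc, ht,
              List.getElem?_eq_none (by simp only [List.length_set]; omega),
              if_neg hrhs, List.getElem?_eq_none (by omega)]
          · rw [if_neg hc, if_neg hrhs]
      · have hstep :
            (if 0 ≤ v ∧ v < (n : Int) then r0.set v.toNat v else r0)[k]? = r0[k]? := by
          split
          · next hc => exact List.getElem?_set_ne (by omega)
          · rfl
        rw [hstep, if_neg (by
          rintro ⟨h1, h2, h3⟩
          rcases List.mem_cons.mp h1 with h1 | h1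
          · exact hvk h1.symm
          · exact hr ⟨h1, h2, h3⟩)]

theorem rearrange_eq (arr : List Int) : rearrange_naive arr = rearrange_naive_alt arr := by
  apply List.ext_getElem?
  intro k
  simp only [rearrange_naive, rearrange_naive_alt]
  rw [foldlA_getElem?, foldlB_getElem?]
  simp only [List.length_replicate, List.mem_range]
  by_cases hk : k < arr.length
  · simp [hk]
  · simp [hk]

-- ===== VERDICT (by name: the statement is the Claim_ definition above) =====
theorem rearrange_naive_spec : Claim_equal_rearrange_naive := by
  intro arr _
  unfold Spec_rearrange_naive
  exact rearrange_eq arr
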